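-- pv_equiv track=rewrite | github.com/happy96026/interview-prep | coding_problems/apr/apr12.py | getBonuses
-- ===== SOURCE A (Python) =====
-- from typing import List
--
-- def getBonuses(performance: List[int]) -> List[int]:
--     bonuses = [1] * len(performance)
--     for i in range(len(performance) - 1):
--         if performance[i] > performance[i + 1]:
--             bonuses[i] += 1
--         elif performance[i + 1] > performance[i]:
--             bonuses[i + 1] += 1
--
--     return bonuses
-- ===== SOURCE B (Python) =====
-- def getBonuses(performance):
--     n = len(performance)
--     return [1
--             + (1 if i > 0 and performance[i] > performance[i - 1] else 0)
--             + (1 if i < n - 1 and performance[i] > performance[i + 1] else 0)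
--             for i in range(n)]
-- ===== Notes on version B (the rewrite author's own statement) =====
-- stated objective: simpler
-- what changed: B is a node-centric comprehension computing each element's bonus directly from its two neighbors, instead of A's edge loop over adjacent pairs that mutates a pre-built list at both endpoints.
import Mathlib
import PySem

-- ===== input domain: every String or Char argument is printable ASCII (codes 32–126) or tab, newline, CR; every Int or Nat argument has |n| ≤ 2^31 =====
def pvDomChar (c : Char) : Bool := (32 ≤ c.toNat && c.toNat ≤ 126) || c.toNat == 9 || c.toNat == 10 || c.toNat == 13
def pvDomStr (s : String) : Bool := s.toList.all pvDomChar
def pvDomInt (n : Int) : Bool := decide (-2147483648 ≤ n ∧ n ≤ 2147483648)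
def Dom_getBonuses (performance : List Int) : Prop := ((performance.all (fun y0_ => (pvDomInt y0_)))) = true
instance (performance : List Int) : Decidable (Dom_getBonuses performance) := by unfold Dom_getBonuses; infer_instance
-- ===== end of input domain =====

-- B replaces A's edge loop (mutating both endpoints of each adjacent pair) by a
-- node-centric comprehension reading each element's two neighbors; objective: simpler.

-- ===== PORT A =====
-- A-side helper: the loop body of A's for-loop (one step of the fold)
def pvStep (performance : List Int) (b : List Int) (i : Int) : List Int :=
  if PySem.List.pyGetD performance i 0 > PySem.List.pyGetD performance (i + 1) 0 then
    PySem.List.pySetD b i (PySem.List.pyGetD b i 0 + 1)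
  else if PySem.List.pyGetD performance (i + 1) 0 > PySem.List.pyGetD performance i 0 then
    PySem.List.pySetD b (i + 1) (PySem.List.pyGetD b (i + 1) 0 + 1)
  else b

def getBonuses (performance : List Int) : List Int :=
  let bonuses : List Int := List.replicate performance.length 1
  (PySem.List.pyRange 0 ((performance.length : Int) - 1) 1).foldl (pvStep performance) bonuses

-- ===== PORT B =====
def getBonuses_alt (performance : List Int) : List Int :=
  let n : Int := performance.length
  (PySem.List.pyRange 0 n 1).map (fun i =>
    1 + (if 0 < i ∧ PySem.List.pyGetD performance i 0 > PySem.List.pyGetD performance (i - 1) 0 then (1 : Int) else 0)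
      + (if i < n - 1 ∧ PySem.List.pyGetD performance i 0 > PySem.List.pyGetD performance (i + 1) 0 then (1 : Int) else 0))

-- ===== PRECONDITION & SPEC =====
def Spec_getBonuses (performance : List Int) (out : List Int) : Prop := out = getBonuses_alt performance
instance (performance : List Int) (out : List Int) : Decidable (Spec_getBonuses performance out) := by unfold Spec_getBonuses; infer_instance

-- ===== CLAIM (what is proved, stated in full; the proofs are below) =====
def Claim_equal_getBonuses : Prop := ∀ (performance : List Int), Dom_getBonuses performance → Spec_getBonuses performance (getBonuses performance)

-- ===== LEMMAS AND PROOFS =====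

-- what step i contributes to position j
def pvContrib (performance : List Int) (i : Int) (j : Nat) : Int :=
  if (j : Int) = i ∧ PySem.List.pyGetD performance i 0 > PySem.List.pyGetD performance (i + 1) 0 then 1
  else if (j : Int) = i + 1 ∧ PySem.List.pyGetD performance (i + 1) 0 > PySem.List.pyGetD performance i 0 then 1
  else 0

theorem pvStep_length (performance b : List Int) (i : Int) :
    (pvStep performance b i).length = b.length := by
  unfold pvStep; split_ifs <;> simp [PySem.List.length_pySetD]

theorem pvStep_getD (performance b : List Int) (i : Int) (hi : 0 ≤ i)
    (hin : i + 1 < (b.length : Int)) (j : Nat) :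
    (pvStep performance b i).getD j 0 = b.getD j 0 + pvContrib performance i j := by
  obtain ⟨k, rfl⟩ : ∃ k : Nat, i = (k : Int) := ⟨i.toNat, (Int.toNat_of_nonneg hi).symm⟩
  have hk1 : ((k : Int) + 1) = ((k + 1 : Nat) : Int) := by push_cast; ring
  have hklen : k + 1 < b.length := by exact_mod_cast (by omega : ((k:Int)+1) < (b.length:Int))
  unfold pvStep pvContrib
  rw [hk1]
  simp only [PySem.List.pySetD_natCast, PySem.List.pyGetD_natCast, Int.natCast_inj]
  split_ifs with h1 h2 <;>
    simp only [List.getD_eq_getElem?_getD, List.getElem?_set] <;>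
    (try split_ifs) <;>
    (try subst_vars) <;>
    (try simp only [Option.getD_some, Option.getD_none]) <;>
    omega

theorem pvFold_getD (performance : List Int) (L : List Int) (b : List Int)
    (hL : ∀ i ∈ L, 0 ≤ i ∧ i + 1 < (b.length : Int)) (j : Nat) :
    (L.foldl (pvStep performance) b).getD j 0
      = b.getD j 0 + (L.map (fun i => pvContrib performance i j)).sum := by
  induction L generalizing b with
  | nil => simp
  | cons i L ih =>
      have hi := hL i (by simp)
      have hrest : ∀ x ∈ L, 0 ≤ x ∧ x + 1 < ((pvStep performance b i).length : Int) := by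
        intro x hx
        rw [pvStep_length]
        exact hL x (by simp [hx])
      simp only [List.foldl_cons, List.map_cons, List.sum_cons]
      rw [ih _ hrest, pvStep_getD performance b i hi.1 hi.2]
      ring

theorem pvSum_contrib (performance : List Int) (m j : Nat) :
    ((PySem.List.pyRange 0 (m : Int) 1).map (fun i => pvContrib performance i j)).sum
      = (if (j : Int) < m ∧ PySem.List.pyGetD performance j 0 > PySem.List.pyGetD performance ((j : Int) + 1) 0 then 1 else 0)
        + (if 1 ≤ j ∧ j ≤ m ∧ PySem.List.pyGetD performance j 0 > PySem.List.pyGetD performance ((j : Int) - 1) 0 then 1 else 0) := by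
  induction m with
  | zero =>
      rw [PySem.List.pyRange_one_eq_nil (by omega)]
      simp only [List.map_nil, List.sum_nil]
      split_ifs <;> omega
  | succ m ih =>
      rw [show ((m + 1 : Nat) : Int) = (m : Int) + 1 by push_cast; ring,
        PySem.List.pyRange_one_succ_right (by positivity),
        List.map_append, List.sum_append]
      rw [ih]
      simp only [List.map_cons, List.map_nil, List.sum_cons, List.sum_nil, add_zero]
      unfold pvContrib
      by_cases hjm : j = m
      · subst hjm
        split_ifs <;> omega
      · by_cases hjm1 : j = m + 1
        · subst hjm1
          rw [show ((m + 1 : Nat) : Int) - 1 = (m : Int) by push_cast; ring] at *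
          push_cast at *
          simp only [true_and, le_refl] at *
          split_ifs <;> omega
        · have hne : (j : Int) ≠ (m : Int) := by omega
          have hne1 : (j : Int) ≠ (m : Int) + 1 := by omega
          split_ifs <;> omega

theorem pvFold_length (performance : List Int) (L : List Int) (b : List Int) :
    (L.foldl (pvStep performance) b).length = b.length := by
  induction L generalizing b with
  | nil => rfl
  | cons i L ih => simp only [List.foldl_cons]; rw [ih, pvStep_length]

-- ===== VERDICT (by name: the statement is the Claim_ definition above) =====
theorem getBonuses_spec : Claim_equal_getBonuses := by
  intro performance _
  unfold Spec_getBonuses getBonuses getBonuses_alt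
  simp only []
  apply List.ext_getElem
  · rw [pvFold_length]
    simp [PySem.List.length_pyRange_one]
  · intro j h1 h2
    rw [pvFold_length, List.length_replicate] at h1
    rw [← List.getD_eq_getElem _ 0, ← List.getD_eq_getElem _ 0]
    have hn1 : (performance.length : Int) - 1 = ((performance.length - 1 : Nat) : Int) := by omega
    have hmap : ((PySem.List.pyRange 0 (performance.length : Int) 1).map (fun i =>
        1 + (if 0 < i ∧ PySem.List.pyGetD performance i 0 > PySem.List.pyGetD performance (i - 1) 0 then (1 : Int) else 0)
          + (if i < (performance.length : Int) - 1 ∧ PySem.List.pyGetD performance i 0 > PySem.List.pyGetD performance (i + 1) 0 then (1 : Int) else 0))).getD j 0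
        = 1 + (if 0 < (j : Int) ∧ PySem.List.pyGetD performance (j : Int) 0 > PySem.List.pyGetD performance ((j : Int) - 1) 0 then (1 : Int) else 0)
          + (if (j : Int) < (performance.length : Int) - 1 ∧ PySem.List.pyGetD performance (j : Int) 0 > PySem.List.pyGetD performance ((j : Int) + 1) 0 then (1 : Int) else 0) := by
      rw [List.getD_eq_getElem?_getD, PySem.List.getElem?_map_pyRange_zero _ _ _ h1, Option.getD_some]
    rw [hmap, hn1, pvFold_getD performance _ _ (by
      intro i hi
      rw [PySem.List.mem_pyRange_one] at hi
      rw [List.length_replicate]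
      omega)]
    have hrep : (List.replicate performance.length (1 : Int)).getD j 0 = 1 := by
      rw [List.getD_eq_getElem _ 0 (by simpa using h1), List.getElem_replicate]
    rw [hrep, pvSum_contrib]
    split_ifs <;> omega
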